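-- pv_equiv track=rewrite | github.com/wiserlake0996/text-extract-py | py.py | extractIOS
-- ===== SOURCE A (Python) =====
-- def extractIOS(ios_extract):
--
--     ios_split_by_error = []
--     ios_string = ""
--
--     for i in range(len(ios_extract)):
--         if ("HOW TO FIX" in ios_extract[i].upper() or "HOW TO IMPROVE" in ios_extract[i].upper()):
--             ios_string += ios_extract[i] +"\n"
--             for i2 in range(i+1,len(ios_extract)):
--                 if i2 == len(ios_extract):
--                     ios_split_by_error.append(ios_string)
--                     break
--
--                 if ("HOW TO FIX" in ios_extract[i2].upper() or "HOW TO IMPROVE" in ios_extract[i2].upper()):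
--                     ios_split_by_error.append(ios_string)
--                     i = i2 - 1
--                     ios_string = ""
--                     break
--                 ios_string += ios_extract[i2] + "\n"
--
--
--     return ios_split_by_error
-- ===== SOURCE B (Python) =====
-- def extractIOS(ios_extract):
--     ios_split_by_error = []
--     current = None
--     for line in ios_extract:
--         if "HOW TO FIX" in line.upper() or "HOW TO IMPROVE" in line.upper():
--             if current is not None:
--                 ios_split_by_error.append(current)
--             current = ""
--         if current is not None:
--             current += line + "\n"
--     return ios_split_by_error
-- ===== Notes on version B (the rewrite author's own statement) =====
-- stated objective: simpler
-- what changed: Replaced A's nested index loops (an inner look-ahead scan from each marker, plus the outer loop re-visiting the same lines) by one structural pass over the lines with a running Optional current-segment accumulator that is flushed at each marker and deliberately never flushed at the end.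
import Mathlib
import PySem

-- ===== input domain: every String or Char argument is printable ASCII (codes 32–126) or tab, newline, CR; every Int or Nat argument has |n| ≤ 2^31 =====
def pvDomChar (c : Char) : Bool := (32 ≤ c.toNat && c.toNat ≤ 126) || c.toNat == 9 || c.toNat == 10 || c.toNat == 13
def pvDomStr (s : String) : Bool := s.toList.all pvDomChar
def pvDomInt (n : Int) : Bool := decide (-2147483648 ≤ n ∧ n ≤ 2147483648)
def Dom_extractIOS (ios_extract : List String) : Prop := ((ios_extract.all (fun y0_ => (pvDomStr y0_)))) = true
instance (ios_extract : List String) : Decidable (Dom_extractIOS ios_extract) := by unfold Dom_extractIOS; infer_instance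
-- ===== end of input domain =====

-- B replaces A's nested index loops by a single pass with a running Optional segment; objective: simpler.

-- marker test shared by both Pythons: "HOW TO FIX" / "HOW TO IMPROVE" in line.upper()
def pvIsMarker (line : String) : Bool :=
  PySem.Str.isIn "HOW TO FIX" (PySem.Str.upper line) || PySem.Str.isIn "HOW TO IMPROVE" (PySem.Str.upper line)

-- ===== PORT A =====
-- the inner 'for i2 in range(i+1, len(...))' loop with its breaks; the 'i2 == len' branch
-- is kept although (as in the Python) it is unreachable inside the range
def extractInner (xs : List String) (n i2 : Nat) (res : List String) (s : String) :
    List String × String :=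
  if i2 < n then
    if i2 = n then (res ++ [s], "")
    else
      let line := PySem.List.pyGetD xs (i2 : Int) ""
      if pvIsMarker line then (res ++ [s], "")   -- Python also sets i = i2 - 1, which has no effect
      else extractInner xs n (i2 + 1) res (s ++ line ++ "\n")
  else (res, s)
termination_by n - i2

-- the body of A's outer 'for i in range(len(...))' loop
def extractStep (xs : List String) (n : Nat) (st : List String × String) (i : Nat) :
    List String × String :=
  let line := PySem.List.pyGetD xs (i : Int) ""
  if pvIsMarker line then extractInner xs n (i + 1) st.1 (st.2 ++ line ++ "\n")
  else st

def extractIOS (ios_extract : List String) : List String :=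
  let n := ios_extract.length
  ((List.range n).foldl (extractStep ios_extract n) ([], "")).1

-- ===== PORT B =====
-- B's loop body: flush the running segment at a marker, then extend it when open
def extractStepAlt (st : List String × Option String) (line : String) :
    List String × Option String :=
  let st := if pvIsMarker line then (st.1 ++ st.2.toList, some "") else st
  match st.2 with
  | none => st
  | some c => (st.1, some (c ++ line ++ "\n"))

def extractIOS_alt (ios_extract : List String) : List String :=
  (ios_extract.foldl extractStepAlt ([], none)).1

-- ===== PRECONDITION & SPEC =====
def Spec_extractIOS (ios_extract : List String) (out : List String) : Prop := out = extractIOS_alt ios_extract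
instance (ios_extract : List String) (out : List String) : Decidable (Spec_extractIOS ios_extract out) := by unfold Spec_extractIOS; infer_instance

-- ===== CLAIM (what is proved, stated in full; the proofs are below) =====
def Claim_equal_extractIOS : Prop := ∀ (ios_extract : List String), Dom_extractIOS ios_extract → Spec_extractIOS ios_extract (extractIOS ios_extract)

-- ===== LEMMAS AND PROOFS =====

-- the segments both programs produce: cur = the segment being accumulated (none before the first marker);
-- the segment open at the end of the input is dropped
def pvSegs : List String → Option String → List String
  | [], _ => []
  | l :: rest, cur =>
    if pvIsMarker l then cur.toList ++ pvSegs rest (some (l ++ "\n"))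
    else pvSegs rest (cur.map (· ++ l ++ "\n"))

-- structural versions of A's two loops (suffix instead of index)
def innerL : List String → List String → String → List String × String
  | [], res, s => (res, s)
  | l :: rest, res, s =>
    if pvIsMarker l then (res ++ [s], "")
    else innerL rest res (s ++ l ++ "\n")

def outerL : List String → List String × String → List String × String
  | [], st => st
  | l :: rest, st =>
    if pvIsMarker l then outerL rest (innerL rest st.1 (st.2 ++ l ++ "\n"))
    else outerL rest st

theorem extractInner_eq_innerL (xs : List String) (i : Nat) (res : List String) (s : String) :
    extractInner xs xs.length i res s = innerL (xs.drop i) res s := by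
  by_cases h : i < xs.length
  · rw [extractInner]
    have hne : ¬ i = xs.length := Nat.ne_of_lt h
    have hd : xs.drop i = xs[i] :: xs.drop (i + 1) := List.drop_eq_getElem_cons h
    have hg : PySem.List.pyGetD xs (i : Int) "" = xs[i] := by
      simp [PySem.List.pyGetD_natCast, List.getD, List.getElem?_eq_getElem h]
    rw [hd, innerL]
    simp only [if_pos h, if_neg hne, hg]
    by_cases hm : pvIsMarker xs[i]
    · simp [hm]
    · simp only [hm, Bool.false_eq_true, ite_false]
      exact extractInner_eq_innerL xs (i + 1) res (s ++ xs[i] ++ "\n")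
  · rw [extractInner]
    have : xs.drop i = [] := List.drop_eq_nil_of_le (Nat.le_of_not_lt h)
    simp [h, this, innerL]
termination_by xs.length - i

theorem foldA_eq_outerL (xs : List String) (i : Nat) (st : List String × String) :
    (List.range' i (xs.length - i)).foldl (extractStep xs xs.length) st
      = outerL (xs.drop i) st := by
  by_cases h : i < xs.length
  · have hlen : xs.length - i = (xs.length - (i + 1)) + 1 := by omega
    have hd : xs.drop i = xs[i] :: xs.drop (i + 1) := List.drop_eq_getElem_cons h
    have hg : PySem.List.pyGetD xs (i : Int) "" = xs[i] := by
      simp [PySem.List.pyGetD_natCast, List.getD, List.getElem?_eq_getElem h]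
    rw [hlen, List.range'_succ, List.foldl_cons, hd, outerL]
    rw [show extractStep xs xs.length st i
        = (if pvIsMarker (PySem.List.pyGetD xs (i : Int) "") then
            extractInner xs xs.length (i + 1) st.1
              (st.2 ++ PySem.List.pyGetD xs (i : Int) "" ++ "\n")
          else st) from rfl]
    simp only [hg, extractInner_eq_innerL]
    by_cases hm : pvIsMarker xs[i]
    · simp only [hm, ite_true]
      exact foldA_eq_outerL xs (i + 1) _
    · simp only [hm, Bool.false_eq_true, ite_false]
      exact foldA_eq_outerL xs (i + 1) st
  · have h1 : xs.length - i = 0 := by omega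
    have h2 : xs.drop i = [] := List.drop_eq_nil_of_le (Nat.le_of_not_lt h)
    simp [h1, h2, outerL]
termination_by xs.length - i

-- A's marker step: run the inner loop, then let the outer loop re-walk the same suffix
theorem outerL_innerL (suf : List String) (res : List String) (t : String) :
    (outerL suf (innerL suf res t)).1 = res ++ pvSegs suf (some t) := by
  induction suf generalizing res t with
  | nil => simp [innerL, outerL, pvSegs]
  | cons l rest ih =>
    by_cases hm : pvIsMarker l
    · rw [innerL, outerL]
      simp only [hm, ite_true]
      rw [show (outerL rest (innerL rest (res ++ [t], ("" : String)).1
            ((res ++ [t], ("" : String)).2 ++ l ++ "\n"))).1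
          = (outerL rest (innerL rest (res ++ [t]) ("" ++ l ++ "\n"))).1 from rfl]
      rw [ih]
      simp [hm, pvSegs]
    · rw [innerL, outerL]
      simp only [hm, Bool.false_eq_true, ite_false]
      rw [ih, pvSegs]
      simp [hm]

theorem outerL_spec (xs : List String) (res : List String) :
    (outerL xs (res, "")).1 = res ++ pvSegs xs none := by
  induction xs generalizing res with
  | nil => simp [outerL, pvSegs]
  | cons l rest ih =>
    by_cases hm : pvIsMarker l
    · rw [outerL]
      simp only [hm, ite_true]
      rw [show (outerL rest (innerL rest (res, ("" : String)).1
            ((res, ("" : String)).2 ++ l ++ "\n"))).1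
          = (outerL rest (innerL rest res ("" ++ l ++ "\n"))).1 from rfl]
      rw [outerL_innerL]
      simp [hm, pvSegs]
    · rw [outerL, pvSegs]
      simp [hm, ih]

theorem foldB_spec (xs : List String) (res : List String) (cur : Option String) :
    (xs.foldl extractStepAlt (res, cur)).1 = res ++ pvSegs xs cur := by
  induction xs generalizing res cur with
  | nil => simp [pvSegs]
  | cons l rest ih =>
    rw [List.foldl_cons, pvSegs]
    by_cases hm : pvIsMarker l
    · rw [show extractStepAlt (res, cur) l
          = (res ++ cur.toList, some ("" ++ l ++ "\n")) from by
        simp [extractStepAlt, hm]]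
      rw [ih]
      simp [hm]
    · cases cur with
      | none =>
        rw [show extractStepAlt (res, none) l = (res, none) from by
          simp [extractStepAlt, hm]]
        rw [ih]
        simp [hm]
      | some c =>
        rw [show extractStepAlt (res, some c) l = (res, some (c ++ l ++ "\n")) from by
          simp [extractStepAlt, hm]]
        rw [ih]
        simp [hm, Option.map]

-- ===== VERDICT (by name: the statement is the Claim_ definition above) =====
theorem extractIOS_spec : Claim_equal_extractIOS := by
  intro xs _
  unfold Spec_extractIOS extractIOS extractIOS_alt
  have hA := foldA_eq_outerL xs 0 ([], "")
  simp only [Nat.sub_zero, List.drop_zero] at hA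
  show ((List.range xs.length).foldl (extractStep xs xs.length) ([], "")).1
      = (xs.foldl extractStepAlt ([], none)).1
  rw [List.range_eq_range', hA, outerL_spec, foldB_spec]
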